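-- pv_equiv track=rewrite | github.com/VishvaKS1/python-programme- | 3a posi,neg.py | find_occurrence
-- ===== SOURCE A (Python) =====
-- def find_occurrence(numbers, target):
--     p_indices = []
--     n_indices = []
--     count = 0
--     for i in range(len(numbers)):
--         if numbers[i] == target:
--             p_indices.append(i)
--             n_indices.append(-len(numbers) + i)
--             count += 1
--     return count, p_indices, n_indices
-- ===== SOURCE B (Python) =====
-- def find_occurrence(numbers, target):
--     count = numbers.count(target)
--     p_indices = []
--     start = 0
--     for _ in range(count):
--         j = numbers.index(target, start)
--         p_indices.append(j)
--         start = j + 1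
--     n = len(numbers)
--     return count, p_indices, [j - n for j in p_indices]
-- ===== Notes on version B (the rewrite author's own statement) =====
-- stated objective: alternative
-- what changed: B first gets the total with numbers.count(target), then finds each match position with repeated numbers.index(target, start) searches (jumping from match to match) instead of A's single index loop maintaining three lockstep accumulators; the negative indices are derived from the match list at the end.
import Mathlib
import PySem

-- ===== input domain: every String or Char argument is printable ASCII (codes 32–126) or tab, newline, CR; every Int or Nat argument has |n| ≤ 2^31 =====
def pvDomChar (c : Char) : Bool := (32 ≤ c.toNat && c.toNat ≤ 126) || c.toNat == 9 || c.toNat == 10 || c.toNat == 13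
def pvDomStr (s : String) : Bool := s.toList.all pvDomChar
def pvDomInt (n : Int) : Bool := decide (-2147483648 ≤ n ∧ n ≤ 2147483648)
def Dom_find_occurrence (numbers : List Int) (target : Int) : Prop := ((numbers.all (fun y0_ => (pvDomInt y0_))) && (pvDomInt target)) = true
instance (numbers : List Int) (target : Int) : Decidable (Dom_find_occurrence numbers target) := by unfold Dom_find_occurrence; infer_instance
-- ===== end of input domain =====

-- B replaces A's single index loop with count() followed by repeated index(target, start) searches (objective: alternative, same cost).

-- ===== PORT A =====
def find_occurrence (numbers : List Int) (target : Int) : Int × List Int × List Int :=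
  (PySem.List.pyRange 0 (numbers.length : Int) 1).foldl
    (fun (s : Int × List Int × List Int) i =>
      if PySem.List.pyGetD numbers i 0 == target then
        (s.1 + 1, s.2.1 ++ [i], s.2.2 ++ [-(numbers.length : Int) + i])
      else s)
    (0, [], [])

-- ===== PORT B =====
-- numbers.index(target, start): first index ≥ start holding target (hand port, exact for 0 ≤ start; none = ValueError)
def pvIndexFrom (xs : List Int) (t : Int) (s : Nat) : Option Nat :=
  (PySem.List.index? (xs.drop s) t).map (· + s)

-- the 'for _ in range(count)' loop of B; the none branch is unreachable when k matches remain (Python would raise)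
def pvLoop (xs : List Int) (t : Int) : Nat → Nat → List Nat → List Nat
  | 0, _, acc => acc
  | k+1, s, acc =>
    match pvIndexFrom xs t s with
    | some j => pvLoop xs t k (j+1) (acc ++ [j])
    | none => acc

def find_occurrence_alt (numbers : List Int) (target : Int) : Int × List Int × List Int :=
  let count := PySem.List.count numbers target
  let p_indices := pvLoop numbers target count 0 []
  let n : Int := (numbers.length : Int)
  ((count : Int), p_indices.map (fun j => (j : Int)), p_indices.map (fun j => (j : Int) - n))

-- ===== PRECONDITION & SPEC =====
def Spec_find_occurrence (numbers : List Int) (target : Int) (out : Int × List Int × List Int) : Prop := out = find_occurrence_alt numbers target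
instance (numbers : List Int) (target : Int) (out : Int × List Int × List Int) : Decidable (Spec_find_occurrence numbers target out) := by unfold Spec_find_occurrence; infer_instance

-- ===== CLAIM (what is proved, stated in full; the proofs are below) =====
def Claim_equal_find_occurrence : Prop := ∀ (numbers : List Int) (target : Int), Dom_find_occurrence numbers target → Spec_find_occurrence numbers target (find_occurrence numbers target)

-- ===== LEMMAS AND PROOFS =====

-- the list of match positions of target in xs at indices ≥ s, in increasing order
def pvMf (xs : List Int) (t : Int) (s : Nat) : List Nat :=
  if h : s < xs.length then (if xs[s] = t then [s] else []) ++ pvMf xs t (s+1) else []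
termination_by xs.length - s

theorem pvMf_of_ge (xs : List Int) (t : Int) (s : Nat) (h : xs.length ≤ s) : pvMf xs t s = [] := by
  unfold pvMf; rw [dif_neg (by omega)]

theorem pvCount_drop (xs : List Int) (t : Int) (s : Nat) :
    (xs.drop s).count t = (pvMf xs t s).length := by
  by_cases h : s < xs.length
  · rw [List.drop_eq_getElem_cons h, List.count_cons]
    conv_rhs => rw [pvMf]
    rw [dif_pos h]
    have ih := pvCount_drop xs t (s+1)
    by_cases he : xs[s] = t
    · simp [he, ih]
    · simp [he, ih]
  · rw [List.drop_eq_nil_of_le (by omega), pvMf_of_ge xs t s (by omega)]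
    simp
termination_by xs.length - s

theorem pvIndexFrom_eq_head (xs : List Int) (t : Int) (s : Nat) :
    pvIndexFrom xs t s = (pvMf xs t s).head? := by
  by_cases h : s < xs.length
  · conv_rhs => rw [pvMf]
    rw [dif_pos h]
    unfold pvIndexFrom
    rw [List.drop_eq_getElem_cons h]
    by_cases he : xs[s] = t
    · rw [he, PySem.List.index?_cons_self]
      simp
    · rw [PySem.List.index?_cons_of_ne _ he]
      have ih := pvIndexFrom_eq_head xs t (s+1)
      unfold pvIndexFrom at ih
      rw [Option.map_map, show ((· + s) ∘ (· + 1) : Nat → Nat) = (· + (s+1)) from funext (fun x => by simp only [Function.comp_apply]; omega), ih]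
      simp [he]
  · unfold pvIndexFrom
    rw [List.drop_eq_nil_of_le (by omega), pvMf_of_ge xs t s (by omega)]
    simp [PySem.List.index?]
termination_by xs.length - s

theorem pvMf_head_cons (xs : List Int) (t : Int) (s j : Nat)
    (hh : (pvMf xs t s).head? = some j) : pvMf xs t s = j :: pvMf xs t (j+1) := by
  by_cases h : s < xs.length
  · by_cases he : xs[s] = t
    · have hmf : pvMf xs t s = s :: pvMf xs t (s+1) := by
        conv_lhs => rw [pvMf]
        rw [dif_pos h]; simp [he]
      rw [hmf] at hh ⊢
      simp only [List.head?_cons, Option.some.injEq] at hh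
      subst hh; rfl
    · have hmf : pvMf xs t s = pvMf xs t (s+1) := by
        conv_lhs => rw [pvMf]
        rw [dif_pos h]; simp [he]
      rw [hmf] at hh ⊢
      exact pvMf_head_cons xs t (s+1) j hh
  · rw [pvMf_of_ge xs t s (by omega)] at hh
    simp at hh
termination_by xs.length - s

theorem pvLoop_eq_mf (xs : List Int) (t : Int) (k : Nat) :
    ∀ (s : Nat) (acc : List Nat), (pvMf xs t s).length = k →
      pvLoop xs t k s acc = acc ++ pvMf xs t s := by
  induction k with
  | zero =>
    intro s acc hk
    rw [List.length_eq_zero_iff.mp hk, List.append_nil]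
    rfl
  | succ k ih =>
    intro s acc hk
    obtain ⟨j, hj⟩ : ∃ j, (pvMf xs t s).head? = some j := by
      cases hmf : pvMf xs t s with
      | nil => rw [hmf] at hk; simp at hk
      | cons a l => exact ⟨a, rfl⟩
    have hcons := pvMf_head_cons xs t s j hj
    have hlen : (pvMf xs t (j+1)).length = k := by
      rw [hcons] at hk; simpa using hk
    show pvLoop xs t (k+1) s acc = acc ++ pvMf xs t s
    unfold pvLoop
    rw [pvIndexFrom_eq_head, hj]
    show pvLoop xs t k (j+1) (acc ++ [j]) = acc ++ pvMf xs t s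
    rw [ih (j+1) (acc ++ [j]) hlen, hcons, List.append_assoc]
    rfl

theorem pvFoldA (xs : List Int) (t : Int) (s : Nat) (hs : s ≤ xs.length) :
    ∀ (c : Int) (ps ns : List Int),
    (PySem.List.pyRange (s : Int) (xs.length : Int) 1).foldl
      (fun (st : Int × List Int × List Int) i =>
        if PySem.List.pyGetD xs i 0 == t then
          (st.1 + 1, st.2.1 ++ [i], st.2.2 ++ [-(xs.length : Int) + i])
        else st)
      (c, ps, ns)
    = (c + ((pvMf xs t s).length : Int),
       ps ++ (pvMf xs t s).map (fun j => (j : Int)),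
       ns ++ (pvMf xs t s).map (fun j => -(xs.length : Int) + (j : Int))) := by
  intro c ps ns
  by_cases h : s < xs.length
  · rw [PySem.List.pyRange_one_cons (by exact_mod_cast h)]
    simp only [List.foldl_cons]
    have hget : PySem.List.pyGetD xs (s : Int) 0 = xs[s] := by
      rw [PySem.List.pyGetD_natCast, List.getD_eq_getElem xs 0 h]
    have hcast : ((s : Int) + 1) = ((s + 1 : Nat) : Int) := by push_cast; ring
    have ih := pvFoldA xs t (s+1) (by omega)
    by_cases he : xs[s] = t
    · rw [if_pos (by simp [hget, he])]
      rw [hcast, ih]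
      have hmf : pvMf xs t s = s :: pvMf xs t (s+1) := by
        conv_lhs => rw [pvMf]
        rw [dif_pos h]; simp [he]
      simp [hmf, List.append_assoc]
      omega
    · rw [if_neg (by simp [hget, he])]
      rw [hcast, ih]
      have hmf : pvMf xs t s = pvMf xs t (s+1) := by
        conv_lhs => rw [pvMf]
        rw [dif_pos h]; simp [he]
      rw [hmf]
  · have hse : s = xs.length := by omega
    subst hse
    rw [PySem.List.pyRange_one_eq_nil (by omega), pvMf_of_ge xs t xs.length (by omega)]
    simp
termination_by xs.length - s

-- ===== VERDICT (by name: the statement is the Claim_ definition above) =====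
theorem find_occurrence_spec : Claim_equal_find_occurrence := by
  intro numbers target _
  unfold Spec_find_occurrence
  have hA := pvFoldA numbers target 0 (by omega) 0 [] []
  rw [Nat.cast_zero] at hA
  have hcount : PySem.List.count numbers target = (pvMf numbers target 0).length := by
    have h0 := pvCount_drop numbers target 0
    rw [List.drop_zero] at h0
    rw [PySem.List.count_eq, h0]
  have hloop : pvLoop numbers target (pvMf numbers target 0).length 0 []
      = pvMf numbers target 0 := by
    rw [pvLoop_eq_mf numbers target _ 0 [] rfl, List.nil_append]
  unfold find_occurrence find_occurrence_alt
  rw [hA]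
  simp only [hcount, hloop, List.nil_append, zero_add]
  refine Prod.ext rfl (Prod.ext rfl ?_)
  simp only
  exact List.map_congr_left (fun j _ => by omega)
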